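-- pv_equiv track=rewrite | github.com/Coder-Vinay-Arc/SEIR_Projects | assignment1.py | make_simhash
-- ===== SOURCE A (Python) =====
-- def rolling_hash(word):
--     p = 53
--     m = 2**64
--     hash_value = 0
--     for i in range(len(word)):
--         s_i = ord(word[i])
--         power_value = p ** i
--         hash_value = hash_value + (s_i * power_value)%m
--     return hash_value
--
-- def make_simhash(freq):
--     V = []
--
--     for i in range(64):
--         V.append(0)
--     for word in freq:
--         weight = freq[word]
--         h = rolling_hash(word)
--         for i in range(64):
--             bit = (h >> i) & 1
--             if bit == 1:
--                 V[i] = V[i] + weight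
--             else:
--                 V[i] = V[i] - weight
--     simhash_binary = ""
--
--     for i in range(63, -1, -1):
--
--         if V[i] > 0:
--             simhash_binary = simhash_binary + "1"
--         else:
--             simhash_binary = simhash_binary + "0"
--     return simhash_binary
-- ===== SOURCE B (Python) =====
-- def make_simhash(freq):
--     # Horner evaluation of the reversed word mod 2^64 replaces per-character big-int
--     # powers; only set bits are counted ("ones"), and bit i is decided by the
--     # majority test 2*ones[i] > total instead of a signed vote vector.
--     mask = (1 << 64) - 1
--     total = 0
--     ones = [0] * 64
--     for word, wt in freq.items():
--         h = 0
--         for ch in reversed(word):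
--             h = (h * 53 + ord(ch)) & mask
--         total += wt
--         for i in range(64):
--             if (h >> i) & 1:
--                 ones[i] += wt
--     return "".join("1" if 2 * ones[i] > total else "0" for i in range(63, -1, -1))
-- ===== Notes on version B (the rewrite author's own statement) =====
-- stated objective: alternative
-- what changed: B hashes each word by Horner evaluation of the reversed word with a running value kept mod 2^64 (no powers at all, vs A's per-character big-int p**i), counts only the set bits into a ones[] table, and decides each output bit by the majority test 2*ones[i] > total instead of A's signed vote vector V[i] > 0.
import Mathlib
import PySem

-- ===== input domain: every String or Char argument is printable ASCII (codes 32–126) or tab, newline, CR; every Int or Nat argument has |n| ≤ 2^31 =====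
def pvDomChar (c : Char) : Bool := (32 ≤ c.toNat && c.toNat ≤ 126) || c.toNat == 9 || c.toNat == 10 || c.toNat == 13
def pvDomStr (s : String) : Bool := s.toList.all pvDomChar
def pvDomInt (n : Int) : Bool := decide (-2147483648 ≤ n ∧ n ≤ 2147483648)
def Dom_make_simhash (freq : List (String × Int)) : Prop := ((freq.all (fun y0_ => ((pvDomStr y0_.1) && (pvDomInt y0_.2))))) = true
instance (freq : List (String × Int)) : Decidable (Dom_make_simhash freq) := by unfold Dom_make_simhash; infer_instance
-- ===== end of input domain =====

-- B hashes by Horner's rule on the reversed word mod 2^64 (A recomputes big-int p**i per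
-- character) and replaces A's signed 64-vote vector by a set-bit counter with a majority test.

def pvM : Int := 18446744073709551616  -- 2**64

-- ===== PORT A =====
-- 'for i in range(len(word)): hash += (ord(word[i]) * p**i) % m' as structural recursion on the chars with index i
def pvRollA : List Char → Nat → Int → Int
  | [], _, h => h
  | c :: cs, i, h => pvRollA cs (i + 1) (h + ((c.toNat : Int) * 53 ^ i) % pvM)

def rolling_hash (word : String) : Int := pvRollA word.toList 0 0

-- inner 'for i in range(64)' loop of A; h ≥ 0, so Python's (h >> i) & 1 is exactly (h / 2^i) % 2 on Int
def pvInner (h wt : Int) (V : List Int) : List Int :=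
  (List.range 64).foldl
    (fun V i =>
      if (h / 2 ^ i) % 2 = 1 then V.set i (V.getD i 0 + wt) else V.set i (V.getD i 0 - wt)) V

def make_simhash (freq : List (String × Int)) : String :=
  -- V = []; for i in range(64): V.append(0)
  let V0 : List Int := (List.range 64).foldl (fun V _ => V ++ [0]) []
  -- for word in freq: weight = freq[word]; …   (dict lookup; the key is always present, so getD's default is never used)
  let V := freq.foldl (fun V p => pvInner (rolling_hash p.1) ((PySem.Dict.mk freq).getD p.1 0) V) V0
  -- for i in range(63, -1, -1): simhash_binary += "1"/"0"
  (List.range 64).reverse.foldl (fun s i => s ++ (if V.getD i 0 > 0 then "1" else "0")) ""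

-- ===== PORT B =====
-- 'for ch in reversed(word): h = (h*53 + ord(ch)) & mask'; '& mask' on h ≥ 0 is '% 2^64'
def pvHorner : List Char → Int → Int
  | [], h => h
  | c :: cs, h => pvHorner cs ((h * 53 + (c.toNat : Int)) % pvM)

-- 'for i in range(64): if (h >> i) & 1: ones[i] += wt'
def pvOnes (h wt : Int) (o : List Int) : List Int :=
  (List.range 64).foldl (fun o i => if (h / 2 ^ i) % 2 = 1 then o.set i (o.getD i 0 + wt) else o) o

def make_simhash_alt (freq : List (String × Int)) : String :=
  let st := freq.foldl
    (fun (st : Int × List Int) p =>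
      let h := pvHorner p.1.toList.reverse 0
      (st.1 + p.2, pvOnes h p.2 st.2))
    (0, List.replicate 64 0)
  String.join ((List.range 64).reverse.map (fun i =>
    if st.1 < 2 * st.2.getD i 0 then "1" else "0"))

-- ===== PRECONDITION & SPEC =====
-- freq encodes a Python dict; a list with duplicate keys is not a faithful encoding (Python's dict
-- construction collapses duplicates before A ever runs), so such lists are excluded.
def Pre_make_simhash (freq : List (String × Int)) : Prop := (freq.map (fun p => p.1)).Nodup
instance (freq : List (String × Int)) : Decidable (Pre_make_simhash freq) := by
  unfold Pre_make_simhash; infer_instance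

def pvWitness_make_simhash : (List (String × Int)) := [("ab", 2), ("c", -1)]

def Spec_make_simhash (freq : List (String × Int)) (out : String) : Prop := out = make_simhash_alt freq
instance (freq : List (String × Int)) (out : String) : Decidable (Spec_make_simhash freq out) := by unfold Spec_make_simhash; infer_instance

-- ===== CLAIM (what is proved, stated in full; the proofs are below) =====
def Claim_equal_make_simhash : Prop := ∀ (freq : List (String × Int)), Dom_make_simhash freq → Pre_make_simhash freq → Spec_make_simhash freq (make_simhash freq)

-- ===== LEMMAS AND PROOFS =====

-- the polynomial Σ c_j · 53^j both hashes are congruent to mod 2^64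
def pvP : List Char → Int
  | [] => 0
  | c :: cs => (c.toNat : Int) + 53 * pvP cs

theorem pvHorner_append (xs ys : List Char) (h : Int) :
    pvHorner (xs ++ ys) h = pvHorner ys (pvHorner xs h) := by
  induction xs generalizing h with
  | nil => rfl
  | cons c xs ih => simp [pvHorner, ih]

theorem pvHorner_congr (cs : List Char) :
    Int.ModEq pvM (pvHorner cs.reverse 0) (pvP cs) := by
  induction cs with
  | nil => rfl
  | cons c cs ih =>
    rw [List.reverse_cons, pvHorner_append]
    show Int.ModEq pvM ((pvHorner cs.reverse 0 * 53 + (c.toNat : Int)) % pvM) _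
    calc (pvHorner cs.reverse 0 * 53 + (c.toNat : Int)) % pvM
        ≡ pvHorner cs.reverse 0 * 53 + (c.toNat : Int) [ZMOD pvM] := Int.emod_emod_of_dvd _ dvd_rfl
      _ ≡ pvP cs * 53 + (c.toNat : Int) [ZMOD pvM] := (ih.mul_right 53).add_right _
      _ = pvP (c :: cs) := by simp [pvP]; ring

theorem pvRollA_congr (cs : List Char) : ∀ (i : Nat) (hA : Int),
    Int.ModEq pvM (pvRollA cs i hA) (hA + 53 ^ i * pvP cs) := by
  induction cs with
  | nil => intro i hA; simp [pvRollA, pvP]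
  | cons c cs ih =>
    intro i hA
    show Int.ModEq pvM (pvRollA cs (i + 1) (hA + ((c.toNat : Int) * 53 ^ i) % pvM)) _
    calc pvRollA cs (i + 1) (hA + ((c.toNat : Int) * 53 ^ i) % pvM)
        ≡ (hA + ((c.toNat : Int) * 53 ^ i) % pvM) + 53 ^ (i + 1) * pvP cs [ZMOD pvM] := ih _ _
      _ ≡ (hA + (c.toNat : Int) * 53 ^ i) + 53 ^ (i + 1) * pvP cs [ZMOD pvM] := by
          exact ((Int.ModEq.refl hA).add (Int.emod_emod_of_dvd _ dvd_rfl)).add_right _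
      _ = hA + 53 ^ i * pvP (c :: cs) := by simp [pvP, pow_succ]; ring

theorem pvHorner_bounds (cs : List Char) : ∀ (h : Int), 0 ≤ h → h < pvM →
    0 ≤ pvHorner cs h ∧ pvHorner cs h < pvM := by
  induction cs with
  | nil => intro h h0 h1; exact ⟨h0, h1⟩
  | cons c cs ih =>
    intro h h0 h1
    exact ih _ (Int.emod_nonneg _ (by decide)) (Int.emod_lt_of_pos _ (by decide))

-- B's Horner hash is A's big-int rolling hash reduced mod 2^64
theorem pvHorner_eq_mod (w : String) :
    pvHorner w.toList.reverse 0 = rolling_hash w % pvM := by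
  have hb := pvHorner_bounds w.toList.reverse 0 le_rfl (by decide)
  have key : pvHorner w.toList.reverse 0 % pvM = rolling_hash w % pvM := by
    have h1 := pvHorner_congr w.toList
    have h2 := pvRollA_congr w.toList 0 0
    unfold rolling_hash
    simp only [Int.ModEq] at h1 h2
    rw [h1, h2]; norm_num
  calc pvHorner w.toList.reverse 0
      = pvHorner w.toList.reverse 0 % pvM := (Int.emod_eq_of_lt hb.1 hb.2).symm
    _ = rolling_hash w % pvM := key

-- bits below 64 only depend on the value mod 2^64
theorem pvBit_mod (h : Int) (i : Nat) (hi : i < 64) :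
    (h % pvM / 2 ^ i) % 2 = (h / 2 ^ i) % 2 := by
  have hdecomp : h = h % pvM + (2 * (2 ^ (63 - i) * (h / pvM))) * 2 ^ i := by
    have h1 : (2:Int) ^ (63 - i) * 2 * 2 ^ i = pvM := by
      have h64 : (63 - i) + 1 + i = 64 := by omega
      calc (2:Int) ^ (63 - i) * 2 * 2 ^ i = 2 ^ ((63 - i) + 1 + i) := by
            rw [pow_add, pow_add, pow_one]
        _ = pvM := by rw [h64]; decide
    calc h = h % pvM + pvM * (h / pvM) := (Int.emod_add_mul_ediv h pvM).symm
      _ = h % pvM + (2 * (2 ^ (63 - i) * (h / pvM))) * 2 ^ i := by rw [← h1]; ring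
  conv_rhs => rw [hdecomp]
  rw [Int.add_mul_ediv_right _ _ (by positivity : (2:Int) ^ i ≠ 0), Int.add_mul_emod_self_left]

-- A's per-word vote at bit j
def pvContrib (h wt : Int) (j : Nat) : Int := if (h / 2 ^ j) % 2 = 1 then wt else -wt
-- B's per-word count at bit j
def pvOne (h wt : Int) (j : Nat) : Int := if (h / 2 ^ j) % 2 = 1 then wt else 0

-- characterisation of a 'for i in range(n): V[i] = u(i, V[i])' loop
theorem pvSetLoop (u : Nat → Int → Int) : ∀ (n : Nat) (V : List Int), n ≤ V.length →
    ((List.range n).foldl (fun V i => V.set i (u i (V.getD i 0))) V).length = V.length ∧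
    ∀ j, ((List.range n).foldl (fun V i => V.set i (u i (V.getD i 0))) V).getD j 0
        = if j < n then u j (V.getD j 0) else V.getD j 0 := by
  intro n
  induction n with
  | zero => intro V _; exact ⟨rfl, fun j => by simp⟩
  | succ n ih =>
    intro V hn
    rw [List.range_succ, List.foldl_append, List.foldl_cons, List.foldl_nil]
    obtain ⟨hlen, hget⟩ := ih V (by omega)
    constructor
    · rw [List.length_set, hlen]
    · intro j
      by_cases hj : j = n
      · subst hj
        rw [List.getD_eq_getElem?_getD, List.getElem?_set_self (by omega : j < _), Option.getD_some,
            hget j, if_neg (lt_irrefl j), if_pos (Nat.lt_succ_self j)]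
      · rw [List.getD_eq_getElem?_getD, List.getElem?_set_ne (fun h => hj h.symm),
            ← List.getD_eq_getElem?_getD, hget j]
        by_cases hlt : j < n
        · rw [if_pos hlt, if_pos (by omega)]
        · rw [if_neg hlt, if_neg (by omega)]

-- A's set-or-set loop on a condition: skip-branch written as a (trivial) set, same shape as pvSetLoop
theorem pvInner_getD (h wt : Int) (V : List Int) (hV : 64 ≤ V.length) :
    (pvInner h wt V).length = V.length ∧
    ∀ j, (pvInner h wt V).getD j 0
        = if j < 64 then V.getD j 0 + pvContrib h wt j else V.getD j 0 := by
  have hfun : (fun (V : List Int) (i : Nat) =>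
      if (h / 2 ^ i) % 2 = 1 then V.set i (V.getD i 0 + wt) else V.set i (V.getD i 0 - wt))
      = fun (V : List Int) (i : Nat) => V.set i ((fun i v => v + pvContrib h wt i) i (V.getD i 0)) := by
    funext V i
    by_cases hb : (h / 2 ^ i) % 2 = 1 <;> simp [hb, pvContrib, sub_eq_add_neg]
  unfold pvInner
  rw [hfun]
  exact pvSetLoop (fun i v => v + pvContrib h wt i) 64 V hV

-- B's set-or-skip loop: the skip branch is a set of the unchanged value, then pvSetLoop applies
theorem pvOnes_getD (h wt : Int) (o : List Int) (ho : 64 ≤ o.length) :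
    (pvOnes h wt o).length = o.length ∧
    ∀ j, (pvOnes h wt o).getD j 0
        = if j < 64 then o.getD j 0 + pvOne h wt j else o.getD j 0 := by
  have hfun : ∀ (o : List Int) (i : Nat), i < o.length →
      (if (h / 2 ^ i) % 2 = 1 then o.set i (o.getD i 0 + wt) else o)
      = o.set i ((fun i v => v + pvOne h wt i) i (o.getD i 0)) := by
    intro o i hi
    by_cases hb : (h / 2 ^ i) % 2 = 1
    · simp [hb, pvOne]
    · simp only [hb, pvOne, if_false, add_zero]
      rw [List.getD_eq_getElem?_getD, List.getElem?_eq_getElem hi, Option.getD_some,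
          List.set_getElem_self]
  unfold pvOnes
  have key : ∀ (n : Nat), n ≤ 64 →
      (List.range n).foldl (fun o i => if (h / 2 ^ i) % 2 = 1 then o.set i (o.getD i 0 + wt) else o) o
      = (List.range n).foldl (fun o i => o.set i ((fun i v => v + pvOne h wt i) i (o.getD i 0))) o := by
    intro n hn
    induction n with
    | zero => rfl
    | succ n ih =>
      rw [List.range_succ, List.foldl_append, List.foldl_append, List.foldl_cons, List.foldl_cons,
          List.foldl_nil, List.foldl_nil, ih (by omega)]
      have hlen := (pvSetLoop (fun i v => v + pvOne h wt i) n o (by omega)).1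
      exact hfun _ n (by rw [hlen]; omega)
  rw [key 64 le_rfl]
  exact pvSetLoop (fun i v => v + pvOne h wt i) 64 o ho

-- the outer word loop of A: each V[j] ends as its start plus the sum of the per-word votes
theorem pvOuter (F : String → Int) (ws : List (String × Int)) :
    ∀ (V : List Int), V.length = 64 →
    (ws.foldl (fun V p => pvInner (rolling_hash p.1) (F p.1) V) V).length = 64 ∧
    ∀ j, j < 64 →
      (ws.foldl (fun V p => pvInner (rolling_hash p.1) (F p.1) V) V).getD j 0
        = V.getD j 0 + (ws.map (fun p => pvContrib (rolling_hash p.1) (F p.1) j)).sum := by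
  induction ws with
  | nil => intro V hV; simpa using hV
  | cons p ws ih =>
    intro V hV
    simp only [List.foldl_cons]
    obtain ⟨hl, hg⟩ := pvInner_getD (rolling_hash p.1) (F p.1) V (le_of_eq hV.symm)
    obtain ⟨hl2, hg2⟩ := ih (pvInner (rolling_hash p.1) (F p.1) V) (hl.trans hV)
    refine ⟨hl2, fun j hj => ?_⟩
    rw [hg2 j hj, hg j, if_pos hj, List.map_cons, List.sum_cons]
    ring

-- the outer word loop of B: running weight total and set-bit counters
theorem pvOuterB (ws : List (String × Int)) :
    ∀ (t : Int) (o : List Int), o.length = 64 →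
    (ws.foldl (fun (st : Int × List Int) p =>
        (st.1 + p.2, pvOnes (pvHorner p.1.toList.reverse 0) p.2 st.2)) (t, o)).1
      = t + (ws.map (fun p => p.2)).sum ∧
    (ws.foldl (fun (st : Int × List Int) p =>
        (st.1 + p.2, pvOnes (pvHorner p.1.toList.reverse 0) p.2 st.2)) (t, o)).2.length = 64 ∧
    ∀ j, j < 64 →
      (ws.foldl (fun (st : Int × List Int) p =>
          (st.1 + p.2, pvOnes (pvHorner p.1.toList.reverse 0) p.2 st.2)) (t, o)).2.getD j 0
        = o.getD j 0 + (ws.map (fun p => pvOne (pvHorner p.1.toList.reverse 0) p.2 j)).sum := by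
  induction ws with
  | nil => intro t o ho; simpa using ho
  | cons p ws ih =>
    intro t o ho
    simp only [List.foldl_cons]
    obtain ⟨hl, hg⟩ := pvOnes_getD (pvHorner p.1.toList.reverse 0) p.2 o (le_of_eq ho.symm)
    obtain ⟨h1, h2, h3⟩ := ih (t + p.2) (pvOnes (pvHorner p.1.toList.reverse 0) p.2 o) (hl.trans ho)
    refine ⟨by rw [h1]; simp only [List.map_cons, List.sum_cons]; ring, h2, fun j hj => ?_⟩
    rw [h3 j hj, hg j, if_pos hj, List.map_cons, List.sum_cons]
    ring

theorem pvV0 : ((List.range 64).foldl (fun (V : List Int) _ => V ++ [0]) []) = List.replicate 64 0 := by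
  decide

-- per word, A's vote is twice B's set-bit count minus the weight (same bit, A big-int / B modular)
theorem pvContrib_eq (w : String) (wt : Int) (j : Nat) (hj : j < 64) :
    pvContrib (rolling_hash w) wt j = 2 * pvOne (pvHorner w.toList.reverse 0) wt j - wt := by
  unfold pvContrib pvOne
  rw [pvHorner_eq_mod, pvBit_mod (rolling_hash w) j hj]
  split <;> ring

-- Σ (2·f p − g p) = 2·Σ f − Σ g, used to turn B's counters into A's votes
theorem pvSumSplit {α : Type} (f g : α → Int) (l : List α) :
    (l.map (fun p => 2 * f p - g p)).sum = 2 * (l.map f).sum - (l.map g).sum := by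
  induction l with
  | nil => simp
  | cons p l ih => simp only [List.map_cons, List.sum_cons, ih]; ring

-- ===== VERDICT (by name: the statement is the Claim_ definition above) =====
theorem make_simhash_spec : Claim_equal_make_simhash := by
  intro freq _ hnd
  show make_simhash freq = make_simhash_alt freq
  simp only [make_simhash, make_simhash_alt, String.join]
  rw [List.foldl_map]
  apply PySem.List.foldl_congr_mem
  intro s i hi
  have hi' : i < 64 := List.mem_range.mp (List.mem_reverse.mp hi)
  congr 1
  obtain ⟨-, hgA⟩ := pvOuter (fun s => (PySem.Dict.mk freq).getD s 0) freq
    (List.replicate 64 0) (by simp)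
  obtain ⟨ht, -, hgB⟩ := pvOuterB freq 0 (List.replicate 64 0) (by simp)
  have hrep : (List.replicate 64 (0:Int)).getD i 0 = 0 := by
    rw [List.getD_eq_getElem?_getD, List.getElem?_replicate]
    split <;> rfl
  rw [pvV0, hgA i hi', ht, hgB i hi', hrep, zero_add, zero_add, zero_add]
  have hsum : (freq.map (fun p => pvContrib (rolling_hash p.1) ((PySem.Dict.mk freq).getD p.1 0) i)).sum
      = (freq.map (fun p => 2 * pvOne (pvHorner p.1.toList.reverse 0) p.2 i - p.2)).sum := by
    apply congrArg List.sum
    apply List.map_congr_left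
    intro p hp
    have hw : (PySem.Dict.mk freq).getD p.1 0 = p.2 := by
      apply PySem.Dict.getD_of_mem_items
      · exact hp
      · exact hnd
    rw [hw]
    exact pvContrib_eq p.1 p.2 i hi'
  rw [hsum, pvSumSplit (fun p => pvOne (pvHorner p.1.toList.reverse 0) p.2 i) (fun p => p.2) freq]
  by_cases hpos :
      (freq.map (fun p => p.2)).sum < 2 * (freq.map (fun p => pvOne (pvHorner p.1.toList.reverse 0) p.2 i)).sum
  · rw [if_pos hpos, if_pos (by omega)]
  · rw [if_neg hpos, if_neg (by omega)]
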